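-- pv_equiv track=rewrite | github.com/atgae9a4/Programmers | 프로그래머스/0/181851. 전국 대회 선발 고사/전국 대회 선발 고사.py | solution
-- ===== SOURCE A (Python) =====
-- def solution(rank, attendance):
--     answer = 0
--     ranking = []
--     for i in range(len((rank))):
--         if attendance[i]:
--             ranking.append(rank[i])
--     ranking.sort()
--
--     answer = 10000 * rank.index(ranking[0]) + 100 * rank.index(ranking[1]) + rank.index(ranking[2])
--
--
--     return answer
-- ===== SOURCE B (Python) =====
-- def solution(rank, attendance):
--     a = b = c = None          # three smallest attending ranks, ascending
--     first = {}                # rank value -> first position in rank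
--     for i, r in enumerate(rank):
--         if r not in first:
--             first[r] = i
--         if attendance[i]:
--             if a is None or r < a:
--                 a, b, c = r, a, b
--             elif b is None or r < b:
--                 b, c = r, b
--             elif c is None or r < c:
--                 c = r
--     return 10000 * first[a] + 100 * first[b] + first[c]
-- ===== Notes on version B (the rewrite author's own statement) =====
-- stated objective: alternative
-- what changed: B replaces A's sort of the attending ranks plus three linear rank.index scans with a single pass that maintains the three smallest attending ranks and a first-occurrence-index dict.
import Mathlib
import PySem

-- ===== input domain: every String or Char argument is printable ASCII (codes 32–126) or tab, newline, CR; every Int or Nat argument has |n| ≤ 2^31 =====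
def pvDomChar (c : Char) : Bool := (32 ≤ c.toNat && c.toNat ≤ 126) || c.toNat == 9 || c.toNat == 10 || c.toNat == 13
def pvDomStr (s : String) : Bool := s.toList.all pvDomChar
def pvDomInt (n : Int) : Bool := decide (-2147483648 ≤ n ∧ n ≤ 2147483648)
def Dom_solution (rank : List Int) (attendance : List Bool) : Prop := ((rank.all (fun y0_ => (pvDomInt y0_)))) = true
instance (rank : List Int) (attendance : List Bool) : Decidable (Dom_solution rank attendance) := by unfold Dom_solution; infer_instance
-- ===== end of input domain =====

-- B replaces A's sort of the attending ranks followed by three rank.index scans with a single pass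
-- that tracks the three smallest attending ranks and a first-occurrence-index dict.

-- ===== PORT A =====
def solution (rank : List Int) (attendance : List Bool) : Int :=
  let ranking : List Int := (PySem.List.pyRange 0 (PySem.List.len rank) 1).foldl
    (fun acc i => if PySem.List.pyGetD attendance i false then acc ++ [PySem.List.pyGetD rank i 0] else acc) []
  let ranking := PySem.List.sorted ranking (fun x => x) false
  10000 * (((PySem.List.index? rank (PySem.List.pyGetD ranking 0 0)).getD 0 : Nat) : Int)
    + 100 * (((PySem.List.index? rank (PySem.List.pyGetD ranking 1 0)).getD 0 : Nat) : Int)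
    + (((PySem.List.index? rank (PySem.List.pyGetD ranking 2 0)).getD 0 : Nat) : Int)

-- ===== PORT B =====
-- Python's 'x is None or r < x' on an Optional[int]
def pvLtOpt (r : Int) : Option Int → Bool
  | none => true
  | some x => decide (r < x)

-- the 'if a is None or r < a: … elif …' chain of Source B on the ascending triple (a, b, c)
def pvUpd3 (t : Option Int × Option Int × Option Int) (r : Int) :
    Option Int × Option Int × Option Int :=
  if pvLtOpt r t.1 then (some r, t.1, t.2.1)
  else if pvLtOpt r t.2.1 then (t.1, some r, t.2.1)
  else if pvLtOpt r t.2.2 then (t.1, t.2.1, some r)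
  else t

def solution_alt (rank : List Int) (attendance : List Bool) : Int :=
  let st := (PySem.List.enumerate rank 0).foldl
    (fun (st : (Option Int × Option Int × Option Int) × PySem.Dict Int Int) p =>
      ((if PySem.List.pyGetD attendance p.1 false then pvUpd3 st.1 p.2 else st.1),
       (if PySem.Dict.contains st.2 p.2 then st.2 else PySem.Dict.insert st.2 p.2 p.1)))
    ((none, none, none), PySem.Dict.empty)
  10000 * (PySem.Dict.get? st.2 (st.1.1.getD 0)).getD 0
    + 100 * (PySem.Dict.get? st.2 (st.1.2.1.getD 0)).getD 0
    + (PySem.Dict.get? st.2 (st.1.2.2.getD 0)).getD 0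

-- ===== PRECONDITION & SPEC =====
-- Pre_ excludes exactly the inputs on which A raises: attendance shorter than rank (IndexError on
-- attendance[i]) and fewer than three attending students (IndexError on ranking[2]).
def Pre_solution (rank : List Int) (attendance : List Bool) : Prop :=
  rank.length ≤ attendance.length ∧
  3 ≤ ((rank.zip attendance).filter (fun q => q.2)).length
instance (rank : List Int) (attendance : List Bool) : Decidable (Pre_solution rank attendance) := by
  unfold Pre_solution; infer_instance

def pvWitness_solution : List Int × List Bool := ([3, 1, 2], [true, true, true])

def Spec_solution (rank : List Int) (attendance : List Bool) (out : Int) : Prop := out = solution_alt rank attendance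
instance (rank : List Int) (attendance : List Bool) (out : Int) : Decidable (Spec_solution rank attendance out) := by unfold Spec_solution; infer_instance

-- ===== CLAIM (what is proved, stated in full; the proofs are below) =====
def Claim_equal_solution : Prop := ∀ (rank : List Int) (attendance : List Bool), Dom_solution rank attendance → Pre_solution rank attendance → Spec_solution rank attendance (solution rank attendance)

-- ===== LEMMAS AND PROOFS =====

-- the first-occurrence dict of B's loop answers lookups with the first index, i.e. A's list.index
lemma pv_dict_fold (l : List Int) (s : Int) (d : PySem.Dict Int Int) (v : Int) :
    PySem.Dict.get? ((PySem.List.enumerate l s).foldl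
        (fun d (p : Int × Int) => if PySem.Dict.contains d p.2 then d else PySem.Dict.insert d p.2 p.1) d) v
      = (PySem.Dict.get? d v).or ((PySem.List.index? l v).map (fun k => s + (k : Int))) := by
  induction l generalizing s d with
  | nil => simp [PySem.List.enumerate_nil]
  | cons r tl ih =>
    rw [PySem.List.enumerate_cons, List.foldl_cons, ih]
    by_cases hrv : r = v
    · subst hrv
      by_cases hc : PySem.Dict.contains d r
      · rw [if_pos hc]
        rw [PySem.Dict.contains_eq_isSome_get?] at hc
        obtain ⟨w, hw⟩ := Option.isSome_iff_exists.mp hc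
        simp [hw]
      · have hnone : PySem.Dict.get? d r = none := by
          rw [PySem.Dict.contains_eq_isSome_get?] at hc
          exact Option.not_isSome_iff_eq_none.mp (by simpa using hc)
        rw [if_neg hc, PySem.Dict.get?_insert_self, PySem.List.index?_cons_self]
        simp [hnone]
    · have hget : PySem.Dict.get? (if PySem.Dict.contains d r then d else PySem.Dict.insert d r s) v
          = PySem.Dict.get? d v := by
        split
        · rfl
        · exact PySem.Dict.get?_insert_of_ne d s (fun h => hrv h.symm)
      rw [hget, PySem.List.index?_cons_of_ne tl hrv]
      cases PySem.List.index? tl v <;> cases PySem.Dict.get? d v <;>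
        simp <;> push_cast <;> ring

-- one pvUpd3 step is insertion into the sorted list, seen through the first three elements
lemma pv_upd3_insertBy (l : List Int) (v : Int) :
    (let m := PySem.List.insertBy (fun a b => decide (a < b)) v l
     (m[0]?, m[1]?, m[2]?)) = pvUpd3 (l[0]?, l[1]?, l[2]?) v := by
  match l with
  | [] => simp [PySem.List.insertBy, pvUpd3, pvLtOpt]
  | [x] =>
    simp only [PySem.List.insertBy, pvUpd3, pvLtOpt]
    by_cases h : v < x <;> simp [h]
  | [x, y] =>
    simp only [PySem.List.insertBy, pvUpd3, pvLtOpt]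
    by_cases h1 : v < x <;> by_cases h2 : v < y <;> simp [h1, h2]
  | x :: y :: w :: rest =>
    simp only [PySem.List.insertBy, pvUpd3, pvLtOpt]
    by_cases h1 : v < x <;> by_cases h2 : v < y <;> by_cases h3 : v < w <;> simp [h1, h2, h3]

-- B's running triple over any value list is the first three elements of the sorted list
lemma pv_fold_upd3 (L : List Int) :
    L.foldl pvUpd3 (none, none, none)
      = ((PySem.List.sorted L (fun x => x) false)[0]?,
         (PySem.List.sorted L (fun x => x) false)[1]?,
         (PySem.List.sorted L (fun x => x) false)[2]?) := by
  induction L using List.reverseRecOn with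
  | nil => simp [PySem.List.sorted]
  | append_singleton L v ih =>
    rw [List.foldl_append, List.foldl_cons, List.foldl_nil, ih,
        ← pv_upd3_insertBy (PySem.List.sorted L (fun x => x) false) v]
    have h : PySem.List.sorted (L ++ [v]) (fun x => x) false
        = PySem.List.insertBy (fun a b => decide (a < b)) v (PySem.List.sorted L (fun x => x) false) := by
      rw [PySem.List.sorted_eq_foldl_insertBy, PySem.List.sorted_eq_foldl_insertBy,
          List.foldl_append, List.foldl_cons, List.foldl_nil]
    rw [h]

theorem solution_spec : Claim_equal_solution := by
  intro rank attendance _ hpre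
  obtain ⟨hlen, h3⟩ := hpre
  unfold Spec_solution solution solution_alt
  simp only []
  set z := rank.zip attendance with hzdef
  have hz : z.length = rank.length := by simp [hzdef, Nat.min_eq_left hlen]
  set R := (z.filter (fun q => q.2)).map (fun q => q.1) with hRdef
  set S := PySem.List.sorted R (fun x => x) false with hSdef
  -- A's filter loop builds exactly the attending ranks R
  have hcong : ∀ (acc : List Int), ∀ i ∈ PySem.List.pyRange 0 (PySem.List.len rank) 1,
      (if PySem.List.pyGetD attendance i false then acc ++ [PySem.List.pyGetD rank i 0] else acc)
      = (fun acc (q : Int × Bool) => if q.2 then acc ++ [q.1] else acc) acc (PySem.List.pyGetD z i ((0:Int), false)) := by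
    intro acc i hi
    rw [PySem.List.mem_pyRange_one] at hi
    simp only [PySem.List.len_eq] at hi
    rw [PySem.List.pyGetD_eq_getElem z _ hi.1 (by omega),
        PySem.List.pyGetD_eq_getElem attendance _ hi.1 (by omega),
        PySem.List.pyGetD_eq_getElem rank _ hi.1 (by omega)]
    simp only [hzdef, List.getElem_zip]
  have hloop : (PySem.List.pyRange 0 (PySem.List.len rank) 1).foldl
      (fun acc i => if PySem.List.pyGetD attendance i false then acc ++ [PySem.List.pyGetD rank i 0] else acc) []
      = R := by
    rw [PySem.List.foldl_congr_mem _ _ _ _ hcong]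
    have hrange : PySem.List.len rank = PySem.List.len z := by simp [hz]
    rw [hrange, PySem.List.foldl_pyRange_zero_pyGetD z ((0:Int), false)
      (fun acc (q : Int × Bool) => if q.2 then acc ++ [q.1] else acc) []]
    rw [PySem.List.foldl_append_if (fun q : Int × Bool => q.2) (fun q => q.1)]
    simp [hRdef]
  -- B's loop splits into the independent triple fold and dict fold
  have hsplit : (PySem.List.enumerate rank 0).foldl
      (fun (st : (Option Int × Option Int × Option Int) × PySem.Dict Int Int) p =>
        ((if PySem.List.pyGetD attendance p.1 false then pvUpd3 st.1 p.2 else st.1),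
         (if PySem.Dict.contains st.2 p.2 then st.2 else PySem.Dict.insert st.2 p.2 p.1)))
      ((none, none, none), PySem.Dict.empty)
      = ((PySem.List.enumerate rank 0).foldl
          (fun t (p : Int × Int) => if PySem.List.pyGetD attendance p.1 false then pvUpd3 t p.2 else t)
          (none, none, none),
         (PySem.List.enumerate rank 0).foldl
          (fun d (p : Int × Int) => if PySem.Dict.contains d p.2 then d else PySem.Dict.insert d p.2 p.1)
          PySem.Dict.empty) := by
    rw [PySem.List.foldl_prod_mk
      (f := fun t (p : Int × Int) => if PySem.List.pyGetD attendance p.1 false then pvUpd3 t p.2 else t)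
      (g := fun d (p : Int × Int) => if PySem.Dict.contains d p.2 then d else PySem.Dict.insert d p.2 p.1)]
  -- B's triple fold is the first three elements of sorted R
  have htriple : (PySem.List.enumerate rank 0).foldl
      (fun t (p : Int × Int) => if PySem.List.pyGetD attendance p.1 false then pvUpd3 t p.2 else t)
      (none, none, none) = (S[0]?, S[1]?, S[2]?) := by
    rw [PySem.List.enumerate_eq_map_pyRange rank 0, List.foldl_map]
    have hcong2 : ∀ (t : Option Int × Option Int × Option Int),
        ∀ j ∈ PySem.List.pyRange 0 (PySem.List.len rank) 1,
        (if PySem.List.pyGetD attendance j false then pvUpd3 t (PySem.List.pyGetD rank j 0) else t)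
        = (fun t (q : Int × Bool) => if q.2 then pvUpd3 t q.1 else t) t (PySem.List.pyGetD z j ((0:Int), false)) := by
      intro t j hj
      rw [PySem.List.mem_pyRange_one] at hj
      simp only [PySem.List.len_eq] at hj
      rw [PySem.List.pyGetD_eq_getElem z _ hj.1 (by omega),
          PySem.List.pyGetD_eq_getElem attendance _ hj.1 (by omega),
          PySem.List.pyGetD_eq_getElem rank _ hj.1 (by omega)]
      simp only [hzdef, List.getElem_zip]
    rw [PySem.List.foldl_congr_mem _ _ _ _ hcong2]
    have hrange : PySem.List.len rank = PySem.List.len z := by simp [hz]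
    rw [hrange, PySem.List.foldl_pyRange_zero_pyGetD z ((0:Int), false)
      (fun t (q : Int × Bool) => if q.2 then pvUpd3 t q.1 else t) (none, none, none)]
    rw [PySem.List.foldl_if_eq_foldl_filter (fun q : Int × Bool => q.2) (fun t q => pvUpd3 t q.1)]
    rw [← List.foldl_map (f := fun q : Int × Bool => q.1) (g := pvUpd3), ← hRdef, pv_fold_upd3, hSdef]
  have hS3 : 3 ≤ S.length := by
    rw [hSdef, PySem.List.length_sorted, hRdef, List.length_map]
    exact h3
  rw [hloop, hsplit, htriple, pv_dict_fold, pv_dict_fold, pv_dict_fold]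
  have hmem : ∀ v : Int, v ∈ S → v ∈ rank := by
    intro v hv
    have h1 : v ∈ R := (PySem.List.mem_sorted R (fun x => x) false v).mp hv
    rw [hRdef] at h1
    obtain ⟨q, hq, hq1⟩ := List.mem_map.mp h1
    exact hq1 ▸ (List.of_mem_zip (List.mem_of_mem_filter hq)).1
  have hidx : ∀ k : Nat, (hk : k < S.length) →
      ∃ j : Nat, PySem.List.index? rank (S[k]'hk) = some j := by
    intro k hk
    exact Option.isSome_iff_exists.mp (by
      rw [PySem.List.index?_isSome_iff]; exact hmem _ (List.getElem_mem hk))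
  obtain ⟨j0, hj0⟩ := hidx 0 (by omega)
  obtain ⟨j1, hj1⟩ := hidx 1 (by omega)
  obtain ⟨j2, hj2⟩ := hidx 2 (by omega)
  have hS0 : S[0]? = some (S[0]'(by omega)) := List.getElem?_eq_getElem (by omega)
  have hS1 : S[1]? = some (S[1]'(by omega)) := List.getElem?_eq_getElem (by omega)
  have hS2 : S[2]? = some (S[2]'(by omega)) := List.getElem?_eq_getElem (by omega)
  have hA : ∀ k : Nat, (hk : k < S.length) → PySem.List.pyGetD S (OfNat.ofNat k) 0 = S[k]'hk := by
    intro k hk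
    rw [PySem.List.pyGetD_ofNat' S k 0, List.getD_eq_getElem _ _ hk]
  rw [hA 0 (by omega), hA 1 (by omega), hA 2 (by omega), hj0, hj1, hj2]
  simp only [hS0, hS1, hS2, Option.getD_some]
  rw [hj0, hj1, hj2]
  simp
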